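-- pv_equiv track=rewrite | github.com/won-hyw/cospro | 모의고사2회/practice7.py | solution
-- ===== SOURCE A (Python) =====
-- def solution(s):
--     answer = []
--     for c in s:
--         if '0' <= c <= '9':
--             n = ord(c) - ord('i')
--             c = chr(-n)
--         answer.append(c)
--     return ''.join(answer)
-- ===== SOURCE B (Python) =====
-- def solution(s):
--     out = []
--     i, n = 0, len(s)
--     while i < n:
--         if '0' <= s[i] <= '9':
--             # parse the maximal digit run as one number v of k digits
--             j, v = i, 0
--             while j < n and '0' <= s[j] <= '9':
--                 v = v * 10 + (ord(s[j]) - 48)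
--                 j += 1
--             k = j - i
--             # 9's complement of the whole run at once: w = (10^k - 1) - v
--             w = 10 ** k - 1 - v
--             run = []
--             for _ in range(k):
--                 w, r = divmod(w, 10)
--                 run.append(chr(48 + r))
--             out.append(''.join(reversed(run)))
--             i = j
--         else:
--             out.append(s[i])
--             i += 1
--     return ''.join(out)
-- ===== Notes on version B (the rewrite author's own statement) =====
-- stated objective: alternative
-- what changed: B replaces A's per-character conditional ord/chr mapping with run-level arithmetic: it scans each maximal digit run, parses it as one integer v of k digits, computes the 9's complement 10**k - 1 - v of the whole run at once, and re-emits its digits via repeated divmod; non-digit characters pass through.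
import Mathlib
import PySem

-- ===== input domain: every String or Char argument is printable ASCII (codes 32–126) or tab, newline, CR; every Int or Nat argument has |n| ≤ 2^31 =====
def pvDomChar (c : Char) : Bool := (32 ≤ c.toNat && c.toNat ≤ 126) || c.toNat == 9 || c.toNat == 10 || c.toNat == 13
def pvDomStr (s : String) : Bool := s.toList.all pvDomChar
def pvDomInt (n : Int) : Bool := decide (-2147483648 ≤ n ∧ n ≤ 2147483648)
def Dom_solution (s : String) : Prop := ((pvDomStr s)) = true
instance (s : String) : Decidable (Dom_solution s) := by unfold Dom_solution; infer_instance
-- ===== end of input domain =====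

-- B replaces A's per-character conditional mapping by run-level arithmetic: each maximal
-- digit run of length k is parsed as one number v and re-emitted as 10^k - 1 - v, its
-- 9's complement; non-digit characters pass through (alternative algorithm, same cost).

-- ===== PORT A =====
-- per-character loop: if '0' <= c <= '9' then c := chr(-(ord(c) - ord('i'))); append
def solution (s : String) : String :=
  let answer := s.toList.foldl (fun acc c =>
    let c' := if '0' ≤ c ∧ c ≤ '9' then
        let n : Int := (c.toNat : Int) - 105  -- ord(c) - ord('i')
        Char.ofNat (-n).toNat                  -- chr(-n); in range 48..57 here
      else c
    acc ++ [c']) ([] : List Char)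
  String.ofList answer

-- ===== PORT B =====
def pvIsDig (c : Char) : Bool := decide ('0' ≤ c ∧ c ≤ '9')

-- the k-iteration divmod loop: appends chr(48 + w % 10), continues with w // 10
-- (v and w are provably nonnegative in B, so Nat division/mod coincide with Python's divmod)
def pvEmit : Nat → Nat → List Char
  | 0, _ => []
  | k + 1, w => Char.ofNat (48 + w % 10) :: pvEmit k (w / 10)

-- the inner while-loop's accumulation of v over the scanned digit run
def pvVal (ds : List Char) : Nat := ds.foldl (fun a d => a * 10 + (d.toNat - 48)) 0

-- the outer while-loop over the string; the inner digit-run while-loop scans the run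
-- (takeWhile) while accumulating v (pvVal), leaving the tail (dropWhile)
def pvGo : List Char → List Char
  | [] => []
  | c :: rest =>
    if pvIsDig c then
      (pvEmit ((c :: rest).takeWhile pvIsDig).length
          (10 ^ ((c :: rest).takeWhile pvIsDig).length - 1
            - pvVal ((c :: rest).takeWhile pvIsDig))).reverse
        ++ pvGo ((c :: rest).dropWhile pvIsDig)
    else
      c :: pvGo rest
termination_by cs => cs.length
decreasing_by
  · simp only [List.dropWhile_cons, *]
    simpa using Nat.lt_succ_of_le (List.length_dropWhile_le pvIsDig rest)
  · simp

def solution_alt (s : String) : String := String.ofList (pvGo s.toList)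

-- ===== PRECONDITION & SPEC =====
def Spec_solution (s : String) (out : String) : Prop := out = solution_alt s
instance (s : String) (out : String) : Decidable (Spec_solution s out) := by unfold Spec_solution; infer_instance

-- ===== CLAIM (what is proved, stated in full; the proofs are below) =====
def Claim_equal_solution : Prop := ∀ (s : String), Dom_solution s → Spec_solution s (solution s)

-- ===== LEMMAS AND PROOFS =====

-- the common per-character value both sides realise
def pvF (c : Char) : Char := if pvIsDig c then Char.ofNat (105 - c.toNat) else c

lemma pv_dig_bounds {c : Char} (h : pvIsDig c = true) : 48 ≤ c.toNat ∧ c.toNat ≤ 57 := by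
  simp only [pvIsDig, decide_eq_true_eq, Char.le_def] at h
  exact ⟨h.1, h.2⟩

-- A's branch computes pvF
lemma pv_charA (c : Char) :
    (if '0' ≤ c ∧ c ≤ '9' then Char.ofNat (-(((c.toNat : Int)) - 105)).toNat else c) = pvF c := by
  by_cases h : '0' ≤ c ∧ c ≤ '9'
  · have hb : c.toNat ≤ 57 := h.2
    have hdig : pvIsDig c = true := by simp [pvIsDig, h]
    simp only [pvF, hdig, if_pos]
    rw [if_pos h]
    congr 1
    omega
  · have hdig : pvIsDig c = false := by simp [pvIsDig, h]
    simp [pvF, h, hdig]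

lemma pvVal_append_singleton (ds : List Char) (d : Char) :
    pvVal (ds ++ [d]) = 10 * pvVal ds + (d.toNat - 48) := by
  simp [pvVal, List.foldl_append, Nat.mul_comm]

lemma pvVal_lt (ds : List Char) (h : ∀ d ∈ ds, pvIsDig d = true) :
    pvVal ds < 10 ^ ds.length := by
  induction ds using List.reverseRecOn with
  | nil => simp [pvVal]
  | append_singleton ds d ih =>
    have hd := pv_dig_bounds (h d (by simp))
    have hds := ih (fun x hx => h x (by simp [hx]))
    rw [pvVal_append_singleton]
    simp only [List.length_append, List.length_cons, List.length_nil, pow_succ]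
    omega

-- the divmod loop emits exactly the complemented digits (low-order first)
lemma pv_emit_run (ds : List Char) (h : ∀ d ∈ ds, pvIsDig d = true) :
    (pvEmit ds.length (10 ^ ds.length - 1 - pvVal ds)).reverse = ds.map pvF := by
  induction ds using List.reverseRecOn with
  | nil => simp [pvEmit]
  | append_singleton ds d ih =>
    have hd := pv_dig_bounds (h d (by simp))
    have hlt := pvVal_lt ds (fun x hx => h x (by simp [hx]))
    have hrec := ih (fun x hx => h x (by simp [hx]))
    have hlen : (ds ++ [d]).length = ds.length + 1 := by simp
    rw [hlen, pvVal_append_singleton]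
    have hw : 10 ^ (ds.length + 1) - 1 - (10 * pvVal ds + (d.toNat - 48))
        = 10 * (10 ^ ds.length - 1 - pvVal ds) + (105 - d.toNat - 48) := by
      have : pvVal ds + 1 ≤ 10 ^ ds.length := hlt
      rw [pow_succ]
      omega
    rw [hw]
    have hmod : (10 * (10 ^ ds.length - 1 - pvVal ds) + (105 - d.toNat - 48)) % 10
        = 105 - d.toNat - 48 := by omega
    have hdiv : (10 * (10 ^ ds.length - 1 - pvVal ds) + (105 - d.toNat - 48)) / 10
        = 10 ^ ds.length - 1 - pvVal ds := by omega
    simp only [pvEmit, hmod, hdiv, List.reverse_cons, hrec, List.map_append, List.map_cons,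
      List.map_nil]
    congr 2
    · unfold pvF
      rw [if_pos (h d (by simp))]
      congr 1
      omega

-- B computes the per-character map, run by run
lemma pv_go_eq (cs : List Char) : pvGo cs = cs.map pvF := by
  induction hn : cs.length using Nat.strong_induction_on generalizing cs with
  | _ n ih =>
    match cs with
    | [] => simp [pvGo]
    | c :: rest =>
      rw [pvGo]
      by_cases hc : pvIsDig c = true
      · rw [if_pos hc]
        have hsplit : (c :: rest).takeWhile pvIsDig ++ (c :: rest).dropWhile pvIsDig
            = c :: rest := List.takeWhile_append_dropWhile
        have hrun : ∀ d ∈ (c :: rest).takeWhile pvIsDig, pvIsDig d = true :=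
          fun d hd => List.mem_takeWhile_imp hd
        have htail : ((c :: rest).dropWhile pvIsDig).length < n := by
          subst hn
          simp only [List.dropWhile_cons, hc, if_true]
          simpa using Nat.lt_succ_of_le (List.length_dropWhile_le pvIsDig rest)
        rw [pv_emit_run _ hrun, ih _ htail _ rfl, ← List.map_append, hsplit]
      · rw [if_neg hc]
        have hr : rest.length < n := by subst hn; simp
        rw [ih _ hr _ rfl, List.map_cons]
        simp [pvF, hc]

-- ===== VERDICT (by name: the statement is the Claim_ definition above) =====
theorem solution_spec : Claim_equal_solution := by
  intro s _
  unfold Spec_solution solution solution_alt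
  rw [pv_go_eq, PySem.List.foldl_append_singleton_eq_map]
  simp only [List.nil_append]
  congr 1
  exact List.map_congr_left (fun c _ => pv_charA c)
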